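-- pv_equiv track=rewrite | github.com/ReCoL1337/pp1 | After Class/nohelpretake.py | p4
-- ===== SOURCE A (Python) =====
-- def p4(w):
--     result = ''
--     for i, char in enumerate(w):
--         if i % 2 == 0:
--             result += char + '+'
--         else:
--             result += char + '-'
--     return result[:-1]
-- ===== SOURCE B (Python) =====
-- def p4(w):
--     pairs = [w[i:i+2] for i in range(0, len(w), 2)]
--     return '-'.join('+'.join(p) for p in pairs)
-- ===== Notes on version B (the rewrite author's own statement) =====
-- stated objective: simpler
-- what changed: Replaces the indexed character loop with alternating separators and a trailing-separator trim by a two-level grouping: chunk the string into blocks of two characters, join each block internally with the plus separator, then join the blocks with the minus separator.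
import Mathlib
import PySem

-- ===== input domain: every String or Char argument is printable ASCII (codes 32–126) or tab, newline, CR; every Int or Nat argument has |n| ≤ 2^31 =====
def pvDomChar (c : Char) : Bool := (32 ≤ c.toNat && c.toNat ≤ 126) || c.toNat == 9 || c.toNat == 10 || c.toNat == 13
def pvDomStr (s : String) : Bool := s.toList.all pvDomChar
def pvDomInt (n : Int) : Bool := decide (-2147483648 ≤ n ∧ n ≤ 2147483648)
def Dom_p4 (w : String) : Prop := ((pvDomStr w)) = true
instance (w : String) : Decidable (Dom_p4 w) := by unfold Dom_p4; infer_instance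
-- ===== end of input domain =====

-- B replaces A's indexed loop with alternating separators (and the trailing-separator trim)
-- by a two-level grouping: 2-char chunks joined internally with one separator, chunks with the other (simpler).

-- ===== PORT A =====
def p4 (w : String) : String :=
  let result : List Char :=
    (PySem.List.enumerate w.toList 0).foldl
      (fun acc p => if PySem.Int.mod p.1 2 == 0 then acc ++ [p.2, '+'] else acc ++ [p.2, '-'])
      []
  String.mk (PySem.List.slice result none (some (-1)))

-- ===== PORT B =====
def p4_alt (w : String) : String :=
  let cs := w.toList
  let pairs : List (List Char) :=
    (PySem.List.pyRange 0 (cs.length : Int) 2).map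
      (fun i => PySem.List.slice cs (some i) (some (i + 2)))
  String.mk (PySem.Chars.join ['-']
    (pairs.map (fun p => PySem.Chars.join ['+'] (p.map (fun c => [c])))))

-- ===== PRECONDITION & SPEC =====
def Spec_p4 (w : String) (out : String) : Prop := out = p4_alt w
instance (w : String) (out : String) : Decidable (Spec_p4 w out) := by unfold Spec_p4; infer_instance

-- ===== CLAIM (what is proved, stated in full; the proofs are below) =====
def Claim_equal_p4 : Prop := ∀ (w : String), Dom_p4 w → Spec_p4 w (p4 w)

-- ===== LEMMAS AND PROOFS =====

-- canonical form of A's accumulated string (before the final [:-1])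
def hA : List Char → List Char
  | [] => []
  | [a] => [a, '+']
  | a :: b :: rest => a :: '+' :: b :: '-' :: hA rest

-- B's 2-chunking
def chunks2 : List Char → List (List Char)
  | [] => []
  | [a] => [[a]]
  | a :: b :: rest => [a, b] :: chunks2 rest

theorem mod_two_mul (k : Nat) : PySem.Int.mod (2 * (k : Int)) 2 = 0 := by
  show Int.fmod _ _ = _
  rw [Int.fmod_eq_emod]; simp

theorem mod_two_mul_add_one (k : Nat) : PySem.Int.mod (2 * (k : Int) + 1) 2 = 1 := by
  show Int.fmod _ _ = _
  rw [Int.fmod_eq_emod]; simp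

theorem foldA (xs : List Char) : ∀ (k : Nat) (acc : List Char),
    (PySem.List.enumerate xs (2 * (k : Int))).foldl
      (fun acc p => if PySem.Int.mod p.1 2 == 0 then acc ++ [p.2, '+'] else acc ++ [p.2, '-'])
      acc = acc ++ hA xs := by
  induction xs using hA.induct with
  | case1 => intro k acc; simp [PySem.List.enumerate_nil, hA]
  | case2 a =>
    intro k acc
    simp [PySem.List.enumerate_cons, PySem.List.enumerate_nil, hA]
  | case3 a b rest ih =>
    intro k acc
    rw [PySem.List.enumerate_cons, PySem.List.enumerate_cons]
    have ih' := ih (k + 1) (acc ++ [a, '+'] ++ [b, '-'])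
    push_cast at ih'
    simp only [List.foldl_cons]
    rw [show (2 * (k : Int) + 1 + 1) = 2 * ((k : Int) + 1) by ring]
    norm_num [mod_two_mul, mod_two_mul_add_one] at ih' ⊢
    rw [ih']
    simp [hA]

theorem hA_ne_nil (cs : List Char) (h : cs ≠ []) : hA cs ≠ [] := by
  cases cs with
  | nil => exact absurd rfl h
  | cons a t => cases t <;> simp [hA]

theorem chunks2_ne_nil (cs : List Char) (h : cs ≠ []) : chunks2 cs ≠ [] := by
  cases cs with
  | nil => exact absurd rfl h
  | cons a t => cases t <;> simp [chunks2]

theorem rangeChunk (cs : List Char) : ∀ (m : Nat), m = (cs.length + 1) / 2 →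
    (List.range m).map (fun k => (cs.drop (2 * k)).take 2) = chunks2 cs := by
  induction cs using chunks2.induct with
  | case1 =>
    intro m hm
    have h0 : m = 0 := by simp at hm; omega
    simp [h0, chunks2]
  | case2 a =>
    intro m hm
    have h1 : m = 1 := by simp at hm; omega
    simp [h1, chunks2]
  | case3 a b rest ih =>
    intro m hm
    simp only [List.length_cons] at hm
    have hm' : m = (rest.length + 1) / 2 + 1 := by omega
    subst hm'
    rw [List.range_succ_eq_map, List.map_cons, List.map_map]
    simp only [chunks2]
    congr 1
    rw [← ih _ rfl]
    apply List.map_congr_left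
    intro k _
    simp only [Function.comp_apply]
    have h2 : 2 * Nat.succ k = 2 * k + 1 + 1 := by omega
    rw [h2, List.drop_succ_cons, List.drop_succ_cons]

theorem mapSlice (cs : List Char) :
    (PySem.List.pyRange 0 (cs.length : Int) 2).map
      (fun i => PySem.List.slice cs (some i) (some (i + 2))) = chunks2 cs := by
  rw [PySem.List.pyRange_of_pos 0 (cs.length : Int) (by norm_num), List.map_map]
  have hif : (if (0 : Int) < (cs.length : Int) then (((cs.length : Int) - 0 + 2 - 1) / 2).toNat else 0)
      = (cs.length + 1) / 2 := by
    split_ifs with h <;> omega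
  rw [hif, ← rangeChunk cs _ rfl]
  apply List.map_congr_left
  intro k _
  simp only [Function.comp_apply]
  have h1 : (0 : Int) + 2 * (k : Int) = ((2 * k : Nat) : Int) := by push_cast; ring
  have h2 : (0 : Int) + 2 * (k : Int) + 2 = ((2 * k : Nat) : Int) + ((2 : Nat) : Int) := by push_cast; ring
  rw [h2, h1, PySem.List.slice_natCast_add]

theorem joinChunks (cs : List Char) :
    PySem.Chars.join ['-'] ((chunks2 cs).map
      (fun p => PySem.Chars.join ['+'] (p.map (fun c => [c])))) = (hA cs).dropLast := by
  induction cs using chunks2.induct with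
  | case1 => simp [chunks2, hA, PySem.Chars.join_nil]
  | case2 a => simp [chunks2, hA, PySem.Chars.join_singleton]
  | case3 a b rest ih =>
    cases hr : rest with
    | nil =>
      subst hr
      simp [chunks2, hA, PySem.Chars.join_singleton, PySem.Chars.join_cons_cons]
    | cons c t =>
      rw [← hr]
      have hne : chunks2 rest ≠ [] := chunks2_ne_nil rest (by simp [hr])
      obtain ⟨y, ys, hy⟩ := List.exists_cons_of_ne_nil hne
      simp only [chunks2, List.map_cons, List.map_nil, hy]
      rw [PySem.Chars.join_cons_cons, PySem.Chars.join_cons_cons, PySem.Chars.join_singleton,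
        show PySem.Chars.join ['+'] (List.map (fun c => [c]) y) ::
            List.map (fun p => PySem.Chars.join ['+'] (List.map (fun c => [c]) p)) ys
          = List.map (fun p => PySem.Chars.join ['+'] (List.map (fun c => [c]) p)) (y :: ys) from rfl,
        ← hy, ih]
      have hAne : hA rest ≠ [] := hA_ne_nil rest (by simp [hr])
      simp only [hA]
      rw [List.dropLast_cons_of_ne_nil (by simp),
        List.dropLast_cons_of_ne_nil (by simp),
        List.dropLast_cons_of_ne_nil (by simp),
        List.dropLast_cons_of_ne_nil hAne]
      simp

theorem p4_eq (w : String) : p4 w = String.mk ((hA w.toList).dropLast) := by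
  have h := foldA w.toList 0 []
  rw [show (2 * ((0 : Nat) : Int)) = 0 by norm_num] at h
  simp only [p4]
  rw [h, PySem.List.slice_to_neg_one]
  simp

theorem p4_alt_eq (w : String) : p4_alt w = String.mk ((hA w.toList).dropLast) := by
  simp only [p4_alt]
  rw [mapSlice, joinChunks]

-- ===== VERDICT (by name: the statement is the Claim_ definition above) =====
theorem p4_spec : Claim_equal_p4 := by
  intro w _
  unfold Spec_p4
  rw [p4_eq, p4_alt_eq]
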